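-- pv_equiv track=rewrite | github.com/gramey02/dnd_project | scripts/excavate/ap.py | create_regex_pam
-- ===== SOURCE A (Python) =====
-- def create_regex_pam(custom_pam_list):
--
--     replace_dict = {
--     'R': '[AG]',
--     'Y': '[CT]',
--     'S': '[GC]',
--     'W': '[AT]',
--     'K': '[GT]',
--     'M': '[AC]',
--     'B':'[CGT]',
--     'D': '[AGT]',
--     'H':'[ACT]',
--     'V': '[ACG]',
--     'N': '[ACGT]'
--     }
--
--     custom_pam_list_regex = []
--     for pam in custom_pam_list:
--         for char in pam:
--             if char in replace_dict.keys():
--                 pam = pam.replace(char, replace_dict[char])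
--             else:
--                 pass
--         custom_pam_list_regex.append(pam)
--
--     return custom_pam_list_regex
-- ===== SOURCE B (Python) =====
-- def _expand(c):
--     if c == 'R': return '[AG]'
--     elif c == 'Y': return '[CT]'
--     elif c == 'S': return '[GC]'
--     elif c == 'W': return '[AT]'
--     elif c == 'K': return '[GT]'
--     elif c == 'M': return '[AC]'
--     elif c == 'B': return '[CGT]'
--     elif c == 'D': return '[AGT]'
--     elif c == 'H': return '[ACT]'
--     elif c == 'V': return '[ACG]'
--     elif c == 'N': return '[ACGT]'
--     else: return c
--
-- def create_regex_pam(custom_pam_list):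
--     result = []
--     for pam in custom_pam_list:
--         parts = []
--         for c in pam:
--             parts.append(_expand(c))
--         result.append(''.join(parts))
--     return result
-- ===== Notes on version B (the rewrite author's own statement) =====
-- stated objective: simpler
-- what changed: B drops the dict entirely: a branch-per-code expander function is applied once to each character in a single left-to-right pass and the pieces are joined, instead of A's per-character loop that calls str.replace and rescans/rebuilds the whole current string at every step.
import Mathlib
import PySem

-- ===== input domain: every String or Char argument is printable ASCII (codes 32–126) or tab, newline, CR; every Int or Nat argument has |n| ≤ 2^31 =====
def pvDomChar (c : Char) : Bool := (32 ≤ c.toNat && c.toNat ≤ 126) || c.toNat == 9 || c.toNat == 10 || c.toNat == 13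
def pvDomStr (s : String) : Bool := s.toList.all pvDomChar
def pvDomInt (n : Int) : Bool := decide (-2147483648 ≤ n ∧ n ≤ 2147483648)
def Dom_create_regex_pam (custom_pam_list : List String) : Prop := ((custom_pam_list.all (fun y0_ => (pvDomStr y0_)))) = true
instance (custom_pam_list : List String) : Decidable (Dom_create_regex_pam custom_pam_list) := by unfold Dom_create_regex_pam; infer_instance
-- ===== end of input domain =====

-- B replaces A's dict plus per-character str.replace rescans by a branch-per-code expander applied
-- once per character in a single left-to-right pass whose pieces are joined (objective: simpler).

-- ===== PORT A =====
-- A's literal replace_dict (values kept as char lists)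
def pvReplaceDict : PySem.Dict Char (List Char) :=
  PySem.Dict.ofList
    [('R', "[AG]".toList), ('Y', "[CT]".toList), ('S', "[GC]".toList),
     ('W', "[AT]".toList), ('K', "[GT]".toList), ('M', "[AC]".toList),
     ('B', "[CGT]".toList), ('D', "[AGT]".toList), ('H', "[ACT]".toList),
     ('V', "[ACG]".toList), ('N', "[ACGT]".toList)]

-- for each pam, loop over its (original) characters; on a dict key, str.replace the whole current string
def create_regex_pam (custom_pam_list : List String) : List String :=
  custom_pam_list.foldl
    (fun acc pam =>
      acc ++ [String.ofList
        (pam.toList.foldl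
          (fun p c =>
            if (PySem.Dict.keys pvReplaceDict).contains c then
              PySem.Chars.replace p [c] (PySem.Dict.getD pvReplaceDict c [])
            else p)
          pam.toList)])
    []

-- ===== PORT B =====
-- B's _expand: an if/elif chain, no dictionary
def pvExpand (c : Char) : List Char :=
  if c = 'R' then "[AG]".toList
  else if c = 'Y' then "[CT]".toList
  else if c = 'S' then "[GC]".toList
  else if c = 'W' then "[AT]".toList
  else if c = 'K' then "[GT]".toList
  else if c = 'M' then "[AC]".toList
  else if c = 'B' then "[CGT]".toList
  else if c = 'D' then "[AGT]".toList
  else if c = 'H' then "[ACT]".toList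
  else if c = 'V' then "[ACG]".toList
  else if c = 'N' then "[ACGT]".toList
  else [c]

-- parts = [_expand(c) for c in pam]; ''.join(parts)
def create_regex_pam_alt (custom_pam_list : List String) : List String :=
  custom_pam_list.map (fun pam => String.ofList (pam.toList.map pvExpand).flatten)

-- ===== PRECONDITION & SPEC =====
def Spec_create_regex_pam (custom_pam_list : List String) (out : List String) : Prop := out = create_regex_pam_alt custom_pam_list
instance (custom_pam_list : List String) (out : List String) : Decidable (Spec_create_regex_pam custom_pam_list out) := by unfold Spec_create_regex_pam; infer_instance

-- ===== CLAIM (what is proved, stated in full; the proofs are below) =====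
def Claim_equal_create_regex_pam : Prop := ∀ (custom_pam_list : List String), Dom_create_regex_pam custom_pam_list → Spec_create_regex_pam custom_pam_list (create_regex_pam custom_pam_list)

-- ===== LEMMAS AND PROOFS =====

def pvF (c : Char) : List Char := PySem.Dict.getD pvReplaceDict c [c]

def pvIsKey (c : Char) : Bool := (PySem.Dict.keys pvReplaceDict).contains c

def pvH (K : List Char) (c : Char) : List Char := if K.contains c then pvF c else [c]

def pvStep (p : List Char) (c : Char) : List Char :=
  if (PySem.Dict.keys pvReplaceDict).contains c then
    PySem.Chars.replace p [c] (PySem.Dict.getD pvReplaceDict c [])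
  else p

theorem pv_go_single (o : Char) (new : List Char) :
    ∀ (l : List Char) (fuel : Nat) (acc : List Char), l.length ≤ fuel →
      PySem.Chars.replace.go [o] new fuel l acc
        = acc.reverse ++ l.flatMap (fun c => if c = o then new else [c]) := by
  intro l
  induction l with
  | nil => intro fuel acc _; cases fuel <;> simp [PySem.Chars.replace.go]
  | cons c t ih =>
    intro fuel acc h
    cases fuel with
    | zero => simp at h
    | succ f =>
      simp only [PySem.Chars.replace.go]
      by_cases hc : c = o
      · subst hc
        have hp : [c].isPrefixOf (c :: t) = true := by simp [List.isPrefixOf]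
        rw [if_pos hp]
        simp only [List.length_cons, List.length_nil, List.drop_succ_cons, List.drop_zero]
        rw [ih f _ (by simpa using h)]
        simp [List.flatMap_cons]
      · have hp : [o].isPrefixOf (c :: t) = false := by
          simp [List.isPrefixOf]
          exact fun h' => hc h'.symm
        rw [if_neg (by simp [hp]), ih f _ (by simpa using h)]
        simp [List.flatMap_cons, hc]

theorem pv_replace_single (l : List Char) (o : Char) (new : List Char) :
    PySem.Chars.replace l [o] new = l.flatMap (fun c => if c = o then new else [c]) := by
  rw [PySem.Chars.replace]
  simp [pv_go_single o new l l.length [] le_rfl]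

theorem pv_flatMap_congr_mem {α β : Type} (l : List α) (f g : α → List β)
    (h : ∀ x ∈ l, f x = g x) : l.flatMap f = l.flatMap g := by
  induction l with
  | nil => rfl
  | cons a t ih =>
    simp only [List.flatMap_cons]
    rw [h a (by simp), ih (fun x hx => h x (by simp [hx]))]

theorem pv_flatMap_id_of {α : Type} (l : List α) (f : α → List α)
    (h : ∀ x ∈ l, f x = [x]) : l.flatMap f = l := by
  rw [pv_flatMap_congr_mem l f (fun x => [x]) h]; simp

theorem pv_key_facts (c : Char) (hc : pvIsKey c = true) :
    PySem.Dict.getD pvReplaceDict c [] = pvF c ∧ ∀ ch ∈ pvF c, pvIsKey ch = false := by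
  have hm : c ∈ PySem.Dict.keys pvReplaceDict := by simpa [pvIsKey] using hc
  have hkeys : PySem.Dict.keys pvReplaceDict = ['R','Y','S','W','K','M','B','D','H','V','N'] := by decide
  rw [hkeys] at hm
  simp only [List.mem_cons, List.not_mem_nil, or_false] at hm
  have main : PySem.Dict.getD pvReplaceDict c [] = pvF c ∧ (pvF c).all (fun ch => !pvIsKey ch) = true := by
    rcases hm with h|h|h|h|h|h|h|h|h|h|h <;> subst h <;> exact ⟨by decide, by decide⟩
  refine ⟨main.1, fun ch hch => ?_⟩
  have := List.all_eq_true.1 main.2 ch hch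
  simpa using this

theorem pv_notkey (c : Char) (hc : pvIsKey c = false) : pvF c = [c] := by
  apply PySem.Dict.getD_of_not_contains
  by_contra h
  have : PySem.Dict.contains pvReplaceDict c = true := by
    cases hcc : PySem.Dict.contains pvReplaceDict c with
    | true => rfl
    | false => exact absurd hcc h
  have := (PySem.Dict.contains_iff_mem_keys (d := pvReplaceDict) (k := c)).1 this
  simp [pvIsKey] at hc
  exact hc this

theorem pv_h_congr (K₁ K₂ : List Char) (h : ∀ x, x ∈ K₁ ↔ x ∈ K₂) : pvH K₁ = pvH K₂ := by
  funext c
  simp only [pvH, List.contains_iff_mem]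
  by_cases hc : c ∈ K₁
  · rw [if_pos (by simpa using hc), if_pos (by simpa using (h c).1 hc)]
  · rw [if_neg (by simpa using hc), if_neg (by simpa using fun hx => hc ((h c).2 hx))]

theorem pv_step_key (cs K : List Char) (c : Char)
    (hK : ∀ k ∈ K, pvIsKey k = true) (hc : pvIsKey c = true) :
    pvStep (cs.flatMap (pvH K)) c = cs.flatMap (pvH (c :: K)) := by
  have hc' : (PySem.Dict.keys pvReplaceDict).contains c = true := hc
  rw [pvStep, if_pos hc', (pv_key_facts c hc).1, pv_replace_single, List.flatMap_assoc]
  apply pv_flatMap_congr_mem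
  intro d _
  by_cases hd : K.contains d
  · have hdK : d ∈ K := by simpa [List.contains_iff_mem] using hd
    have hdkey : pvIsKey d = true := hK d hdK
    have h1 : pvH K d = pvF d := by rw [pvH, if_pos hd]
    have h2 : pvH (c :: K) d = pvF d := by
      rw [pvH, if_pos (by simp [hdK])]
    rw [h1, h2]
    apply pv_flatMap_id_of
    intro x hx
    have : pvIsKey x = false := (pv_key_facts d hdkey).2 x hx
    rw [if_neg]
    intro hxc; subst hxc
    rw [this] at hc; exact Bool.noConfusion hc
  · have hdK : d ∉ K := by simpa [List.contains_iff_mem] using hd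
    have h1 : pvH K d = [d] := by rw [pvH, if_neg hd]
    rw [h1]
    by_cases hdc : d = c
    · subst hdc
      rw [pvH, if_pos (by simp)]
      simp
    · rw [pvH, if_neg (by simp [hdc, hdK])]
      simp [hdc]

theorem pv_loop (cs : List Char) :
    ∀ (rest K : List Char), (∀ k ∈ K, pvIsKey k = true) →
      rest.foldl pvStep (cs.flatMap (pvH K))
        = cs.flatMap (pvH (rest.filter (fun c => pvIsKey c) ++ K)) := by
  intro rest
  induction rest with
  | nil => intro K _; simp
  | cons c t ih =>
    intro K hK
    simp only [List.foldl_cons, List.filter_cons]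
    by_cases hc : pvIsKey c = true
    · rw [pv_step_key cs K c hK hc,
        ih (c :: K) (fun k hk => (List.mem_cons.1 hk).elim (fun h => h ▸ hc) (hK k))]
      rw [pv_h_congr (t.filter (fun c => pvIsKey c) ++ c :: K)
        ((c :: t.filter (fun c => pvIsKey c)) ++ K) (by intro x; simp; tauto), hc]
      simp
    · have hc' : pvIsKey c = false := by cases h : pvIsKey c; rfl; exact absurd h hc
      have hstep : pvStep (cs.flatMap (pvH K)) c = cs.flatMap (pvH K) := by
        have heq : (PySem.Dict.keys pvReplaceDict).contains c = false := hc'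
        simp only [pvStep, heq, Bool.false_eq_true, if_false]
      rw [hstep, ih K hK, hc']
      simp

theorem pv_expand_eq (c : Char) : pvF c = pvExpand c := by
  by_cases hk : pvIsKey c = true
  · have hm : c ∈ PySem.Dict.keys pvReplaceDict := by simpa [pvIsKey] using hk
    have hkeys : PySem.Dict.keys pvReplaceDict = ['R','Y','S','W','K','M','B','D','H','V','N'] := by decide
    rw [hkeys] at hm
    simp only [List.mem_cons, List.not_mem_nil, or_false] at hm
    rcases hm with h|h|h|h|h|h|h|h|h|h|h <;> subst h <;> decide
  · have hk' : pvIsKey c = false := by cases h : pvIsKey c; rfl; exact absurd h hk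
    rw [pv_notkey c hk', pvExpand]
    have hm : c ∉ PySem.Dict.keys pvReplaceDict := by
      intro h
      have ht : pvIsKey c = true := by simpa [pvIsKey, List.contains_iff_mem] using h
      rw [ht] at hk'; exact Bool.noConfusion hk'
    have hkeys : PySem.Dict.keys pvReplaceDict = ['R','Y','S','W','K','M','B','D','H','V','N'] := by decide
    rw [hkeys] at hm
    simp only [List.mem_cons, List.not_mem_nil, or_false, not_or] at hm
    obtain ⟨h1,h2,h3,h4,h5,h6,h7,h8,h9,h10,h11⟩ := hm
    simp [h1,h2,h3,h4,h5,h6,h7,h8,h9,h10,h11]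

theorem pv_inner (cs : List Char) :
    cs.foldl pvStep cs = (cs.map pvExpand).flatten := by
  have h0 : cs = cs.flatMap (pvH []) := by
    rw [pv_flatMap_id_of cs (pvH []) (by intro x _; rw [pvH, if_neg (by simp)])]
  have key := pv_loop cs cs [] (by intro k hk; simp at hk)
  rw [← h0] at key
  rw [key, ← List.flatMap_def]
  apply pv_flatMap_congr_mem
  intro d hd
  by_cases hk : pvIsKey d = true
  · rw [pvH, if_pos (by simp [List.mem_filter]; exact ⟨hd, hk⟩), pv_expand_eq]
  · have hk' : pvIsKey d = false := by cases h : pvIsKey d; rfl; exact absurd h hk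
    rw [pvH, if_neg (by simp [List.mem_filter, hk']), ← pv_notkey d hk', pv_expand_eq]

theorem pv_outer {α β : Type} (l : List α) (g : α → β) :
    ∀ init : List β, l.foldl (fun acc p => acc ++ [g p]) init = init ++ l.map g := by
  induction l with
  | nil => intro init; simp
  | cons a t ih => intro init; simp [ih]

-- ===== VERDICT (by name: the statement is the Claim_ definition above) =====
theorem create_regex_pam_spec : Claim_equal_create_regex_pam := by
  intro l _
  unfold Spec_create_regex_pam create_regex_pam create_regex_pam_alt
  rw [pv_outer l _ []]
  simp only [List.nil_append]
  apply List.map_congr_left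
  intro pam _
  congr 1
  exact pv_inner pam.toList
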